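-- pv_equiv track=rewrite | github.com/robertmaxwilliams/data-structures | assignment2/problem2.py | func_f
-- ===== SOURCE A (Python) =====
-- def func_f(n):
--     summ = 0
--     for i in range(1, n):
--         for j in range(1, i**2):
--             if j % i == 0:
--                 for k in range(j):
--                     summ += 1
--
--     return summ
-- ===== SOURCE B (Python) =====
-- def func_f(n):
--     # Closed form: the loops add j for each multiple j = i*t (1 <= t <= i-1) of i,
--     # i.e. sum_{i=1}^{n-1} i^2*(i-1)/2, which telescopes to m*(m+1)*(m-1)*(3*m+2)/24 with m = n-1.
--     if n < 2:
--         return 0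
--     m = n - 1
--     return m * (m + 1) * (m - 1) * (3 * m + 2) // 24
-- ===== Notes on version B (the rewrite author's own statement) =====
-- stated objective: faster
-- what changed: Replaced the triple nested loop (iterating k to increment a counter, over multiples j of i, over i<n) by the closed-form polynomial m*(m+1)*(m-1)*(3*m+2)//24 with m=n-1.
import Mathlib
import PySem

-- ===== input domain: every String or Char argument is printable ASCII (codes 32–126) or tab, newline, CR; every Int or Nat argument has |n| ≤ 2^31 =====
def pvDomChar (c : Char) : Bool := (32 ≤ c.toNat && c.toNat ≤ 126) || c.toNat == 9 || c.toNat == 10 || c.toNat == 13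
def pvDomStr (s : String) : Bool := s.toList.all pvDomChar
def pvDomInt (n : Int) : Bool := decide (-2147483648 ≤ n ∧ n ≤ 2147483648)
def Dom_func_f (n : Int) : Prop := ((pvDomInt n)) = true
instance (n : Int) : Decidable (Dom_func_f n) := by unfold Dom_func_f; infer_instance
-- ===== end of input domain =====

-- B replaces A's O(n^4) triple nested loop by the closed-form polynomial m*(m+1)*(m-1)*(3*m+2)//24 (m = n-1).

-- ===== PORT A =====
def func_f (n : Int) : Int :=
  (PySem.List.pyRange 1 n 1).foldl (fun summ i =>
    (PySem.List.pyRange 1 (i ^ 2) 1).foldl (fun summ j =>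
      if PySem.Int.mod j i == 0 then
        (PySem.List.pyRange 0 j 1).foldl (fun summ _ => summ + 1) summ
      else summ) summ) 0

-- ===== PORT B =====
def func_f_alt (n : Int) : Int :=
  if n < 2 then 0
  else
    let m := n - 1
    PySem.Int.floordiv (m * (m + 1) * (m - 1) * (3 * m + 2)) 24

-- ===== PRECONDITION & SPEC =====
def Spec_func_f (n : Int) (out : Int) : Prop := out = func_f_alt n
instance (n : Int) (out : Int) : Decidable (Spec_func_f n out) := by unfold Spec_func_f; infer_instance

-- ===== CLAIM (what is proved, stated in full; the proofs are below) =====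
def Claim_equal_func_f : Prop := ∀ (n : Int), Dom_func_f n → Spec_func_f n (func_f n)

-- ===== LEMMAS AND PROOFS =====

-- inner loop: for k in range(j): summ += 1  adds j (j ≥ 0)
theorem pv_inner (j s : Int) (hj : 0 ≤ j) :
    (PySem.List.pyRange 0 j 1).foldl (fun summ _ => summ + 1) s = s + j := by
  rw [PySem.List.foldl_add (g := fun _ => (1 : Int))]
  simp [PySem.List.length_pyRange_one]
  omega

-- a conditional-add foldl is the start plus the sum of the guarded values
theorem pv_foldl_if_add (l : List Int) (c : Int → Bool) (s : Int) :
    l.foldl (fun s j => if c j then s + j else s) s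
      = s + (l.map (fun j => if c j then j else 0)).sum := by
  induction l generalizing s with
  | nil => simp
  | cons x xs ih =>
      simp only [List.foldl_cons, List.map_cons, List.sum_cons, ih]
      split_ifs <;> ring

-- sum of guarded multiples of i over range(1, i*t)
theorem pv_mid (i : Int) (hi : 1 ≤ i) (t : Nat) :
    2 * ((PySem.List.pyRange 1 (i * t) 1).map
          (fun j => if PySem.Int.mod j i == 0 then j else 0)).sum
      = i * t * (t - 1) := by
  induction t with
  | zero => simp [PySem.List.pyRange_one_eq_nil]
  | succ t ih =>
      by_cases ht : t = 0
      · subst ht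
        have h0 : ((PySem.List.pyRange 1 (i * (0 + 1 : Nat)) 1).map
            (fun j => if PySem.Int.mod j i == 0 then j else 0)).sum = 0 := by
          apply List.sum_eq_zero
          intro x hx
          simp only [List.mem_map] at hx
          obtain ⟨j, hj, hxj⟩ := hx
          rw [PySem.List.mem_pyRange_one] at hj
          have hji : j < i := by push_cast at hj; omega
          have : PySem.Int.mod j i = j := by
            rw [PySem.Int.mod_eq_emod_of_pos (by omega)]
            exact Int.emod_eq_of_lt (by omega) hji
          simp [this, show ¬ j = 0 by omega] at hxj
          omega
        rw [h0]; push_cast; ring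
      · have ht1 : 1 ≤ t := Nat.one_le_iff_ne_zero.mpr ht
        have hb : i * ((t + 1 : Nat) : Int) = i * t + i := by push_cast; ring
        have htpos : (1 : Int) ≤ i * t := by nlinarith [Int.natCast_pos.mpr ht1]
        rw [hb]
        have hsplit : PySem.List.pyRange 1 (i * t + i) 1
            = PySem.List.pyRange 1 (i * t) 1 ++ PySem.List.pyRange (i * t) (i * t + i) 1 :=
          PySem.List.pyRange_one_append 1 (i * t) (i * t + i) htpos (by omega)
        have hc : PySem.List.pyRange (i * t) (i * t + i) 1
            = i * t :: PySem.List.pyRange (i * t + 1) (i * t + i) 1 :=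
          PySem.List.pyRange_one_cons (by omega)
        have hhead : PySem.Int.mod (i * t) i = 0 := by
          rw [PySem.Int.mod_eq_zero_iff_dvd]
          exact ⟨t, rfl⟩
        have htail : ((PySem.List.pyRange (i * t + 1) (i * t + i) 1).map
            (fun j => if PySem.Int.mod j i == 0 then j else 0)).sum = 0 := by
          apply List.sum_eq_zero
          intro x hx
          simp only [List.mem_map] at hx
          obtain ⟨j, hj, hxj⟩ := hx
          rw [PySem.List.mem_pyRange_one] at hj
          have hm : PySem.Int.mod j i = j - i * t := by
            rw [PySem.Int.mod_eq_emod_of_pos (by omega)]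
            have h2 := Int.add_mul_emod_self_left (a := j - i * t) (b := i) (c := t)
            rw [show j - i * t + i * t = j by ring] at h2
            rw [h2]
            exact Int.emod_eq_of_lt (by omega) (by omega)
          rw [hm] at hxj
          simp [show ¬ (j - i * t = 0) by omega] at hxj
          omega
        rw [hsplit, List.map_append, List.sum_append, hc]
        simp only [List.map_cons, List.sum_cons, hhead]
        have : ((0 : Int) == 0) = true := by decide
        rw [this, if_pos rfl, htail, mul_add, ih]
        push_cast; ring

-- the middle loop body, as a function of i ≥ 1
theorem pv_body (i s : Int) :
    (PySem.List.pyRange 1 (i ^ 2) 1).foldl (fun summ j =>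
        if PySem.Int.mod j i == 0 then
          (PySem.List.pyRange 0 j 1).foldl (fun summ _ => summ + 1) summ
        else summ) s
      = s + ((PySem.List.pyRange 1 (i ^ 2) 1).map
          (fun j => if PySem.Int.mod j i == 0 then j else 0)).sum := by
  have hcongr : (PySem.List.pyRange 1 (i ^ 2) 1).foldl (fun summ j =>
        if PySem.Int.mod j i == 0 then
          (PySem.List.pyRange 0 j 1).foldl (fun summ _ => summ + 1) summ
        else summ) s
      = (PySem.List.pyRange 1 (i ^ 2) 1).foldl (fun summ j =>
          if PySem.Int.mod j i == 0 then summ + j else summ) s := by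
    apply PySem.List.foldl_congr_mem
    intro a x hx
    rw [PySem.List.mem_pyRange_one] at hx
    split_ifs with h
    · exact pv_inner x a (by omega)
    · rfl
  rw [hcongr, pv_foldl_if_add]

-- value of the middle loop body increment: 2 * (body sum at i) = i^3 - i^2
theorem pv_body_val (i : Int) (hi : 1 ≤ i) :
    2 * ((PySem.List.pyRange 1 (i ^ 2) 1).map
        (fun j => if PySem.Int.mod j i == 0 then j else 0)).sum
      = i * i * (i - 1) := by
  have hsq : i ^ 2 = i * (i.toNat : Nat) := by
    rw [Int.toNat_of_nonneg (by omega)]; ring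
  rw [hsq, pv_mid i hi i.toNat, Int.toNat_of_nonneg (by omega)]

-- outer loop closed form: 24 * func_f n = m*(m+1)*(m-1)*(3*m+2) for n ≥ 1
theorem pv_outer (n : Int) (hn : 1 ≤ n) :
    24 * func_f n = (n - 1) * n * (n - 2) * (3 * (n - 1) + 2) := by
  unfold func_f
  induction n, hn using Int.le_induction with
  | base => simp [PySem.List.pyRange_one_eq_nil]
  | succ n hn ih =>
      rw [PySem.List.pyRange_one_succ_right (by omega)]
      rw [List.foldl_append]
      simp only [List.foldl_cons, List.foldl_nil]
      rw [pv_body n _]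
      rw [mul_add, ih]
      have := pv_body_val n hn
      linarith [this]

theorem pv_floordiv_24 (q : Int) : PySem.Int.floordiv (24 * q) 24 = q := by
  rw [PySem.Int.floordiv_eq_ediv_of_pos (by norm_num)]
  exact Int.mul_ediv_cancel_left q (by norm_num)

-- ===== VERDICT (by name: the statement is the Claim_ definition above) =====
theorem func_f_spec : Claim_equal_func_f := by
  intro n _
  unfold Spec_func_f func_f_alt
  by_cases h : n < 2
  · simp only [if_pos h]
    unfold func_f
    rw [PySem.List.pyRange_one_eq_nil (by omega)]
    rfl
  · simp only [if_neg h]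
    have h24 := pv_outer n (by omega)
    have : (n - 1) * (n - 1 + 1) * (n - 1 - 1) * (3 * (n - 1) + 2)
        = 24 * func_f n := by rw [h24]; ring
    rw [this, pv_floordiv_24]
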